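-- pv_equiv track=rewrite | github.com/hmcneill46/NYTGamesJsonCreator | StrandsSolver.py | can_partition_components
-- ===== SOURCE A (Python) =====
-- def can_partition_components(component_sizes, strands):
--     if not component_sizes:
--         return len(strands) == 0
--     component_sizes = sorted(component_sizes, reverse=True)
--     target = component_sizes[0]
--
--     subsets = []
--     def find_subsets(i, current, current_sum):
--         if current_sum == target:
--             subsets.append(current[:])
--             return
--         if i >= len(strands) or current_sum > target:
--             return
--         current.append(i)
--         find_subsets(i+1, current, current_sum + strands[i])
--         current.pop()
--         find_subsets(i+1, current, current_sum)
--     find_subsets(0, [], 0)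
--     if not subsets:
--         return False
--     for subset in subsets:
--         remaining = [strands[i] for i in range(len(strands)) if i not in subset]
--         if can_partition_components(component_sizes[1:], remaining):
--             return True
--     return False
-- ===== SOURCE B (Python) =====
-- def can_partition_components(component_sizes, strands):
--     # Single interleaved DFS with early exit: no subset list is materialized and
--     # the remaining strands are threaded along instead of rebuilt by index filtering.
--     def solve(sizes, rest_strands):
--         if not sizes:
--             return not rest_strands
--         target = sizes[0]
--         rest = sizes[1:]
--         n = len(rest_strands)
--
--         def dfs(i, s, skipped):
--             if s == target:
--                 return solve(rest, skipped + rest_strands[i:])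
--             if i >= n or s > target:
--                 return False
--             return (dfs(i + 1, s + rest_strands[i], skipped)
--                     or dfs(i + 1, s, skipped + [rest_strands[i]]))
--
--         return dfs(0, 0, [])
--
--     return solve(sorted(component_sizes, reverse=True), strands)
-- ===== Notes on version B (the rewrite author's own statement) =====
-- stated objective: alternative
-- what changed: Instead of materializing the full list of target-sum index subsets per level and then rebuilding the remaining strands by an index-membership filter over range(len(strands)) for each subset, B runs one interleaved DFS that threads the remaining strands along, recurses into the next component size as soon as a subset completes and returns on the first success (early exit, no subset list); the sizes are sorted once instead of at every recursion level.
import Mathlib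
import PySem

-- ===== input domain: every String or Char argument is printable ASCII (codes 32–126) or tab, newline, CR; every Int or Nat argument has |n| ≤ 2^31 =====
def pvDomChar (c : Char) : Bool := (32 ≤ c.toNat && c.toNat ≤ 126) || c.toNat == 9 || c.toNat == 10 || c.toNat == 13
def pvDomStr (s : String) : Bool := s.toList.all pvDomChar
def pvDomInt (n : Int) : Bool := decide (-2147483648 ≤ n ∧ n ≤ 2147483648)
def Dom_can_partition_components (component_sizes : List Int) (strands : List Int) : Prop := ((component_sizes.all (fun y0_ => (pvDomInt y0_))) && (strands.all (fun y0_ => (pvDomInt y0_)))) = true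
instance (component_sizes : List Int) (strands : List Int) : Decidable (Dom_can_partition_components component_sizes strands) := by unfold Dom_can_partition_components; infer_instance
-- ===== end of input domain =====

-- B replaces A's materialize-all-subsets-then-filter recursion by one interleaved DFS with
-- early exit that threads the remaining strands along (objective: alternative decomposition).

-- ===== PORT A =====
-- find_subsets: returns the list of recorded subsets (index lists), include-branch first.
-- strands[i] is only read under the guard i < len(strands), so getD is exact there.
def pvFindSubsets (strands : List Int) (target : Int) (i : Nat) (current : List Nat) (s : Int) : List (List Nat) :=
  if s = target then [current]
  else if i ≥ strands.length ∨ s > target then []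
  else
    pvFindSubsets strands target (i+1) (current ++ [i]) (s + strands.getD i 0)
      ++ pvFindSubsets strands target (i+1) current s
termination_by strands.length - i
decreasing_by all_goals omega

-- remaining = [strands[i] for i in range(len(strands)) if i not in subset]
def pvRemaining (strands : List Int) (sub : List Nat) : List Int :=
  ((List.range strands.length).filter (fun j => !(sub.contains j))).map (fun j => strands.getD j 0)

def can_partition_components (component_sizes : List Int) (strands : List Int) : Bool :=
  if component_sizes = [] then strands.length == 0
  else
    let sortedCs := PySem.List.sorted component_sizes (fun x => x) true
    let target := sortedCs.headD 0
    let subsets := pvFindSubsets strands target 0 [] 0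
    if subsets = [] then false
    else subsets.any (fun sub =>
      can_partition_components (sortedCs.drop 1) (pvRemaining strands sub))
termination_by component_sizes.length
decreasing_by
  simp only [List.length_drop, PySem.List.length_sorted]
  cases component_sizes with
  | nil => simp_all
  | cons a t => simp

-- ===== PORT B =====
mutual
-- solve(sizes, rest_strands)
def altSolve (sizes : List Int) (strands : List Int) : Bool :=
  match sizes with
  | [] => strands.isEmpty
  | target :: rest => altDfs rest strands target 0 0 []
termination_by (sizes.length, strands.length + 1)

-- dfs(i, s, skipped); rest_strands[i:] is List.drop i (i is a Nat, exact)
def altDfs (rest : List Int) (strands : List Int) (target : Int) (i : Nat) (s : Int) (skipped : List Int) : Bool :=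
  if s = target then altSolve rest (skipped ++ strands.drop i)
  else if i ≥ strands.length ∨ s > target then false
  else
    altDfs rest strands target (i+1) (s + strands.getD i 0) skipped
      || altDfs rest strands target (i+1) s (skipped ++ [strands.getD i 0])
termination_by (rest.length + 1, strands.length - i)
end

def can_partition_components_alt (component_sizes : List Int) (strands : List Int) : Bool :=
  altSolve (PySem.List.sorted component_sizes (fun x => x) true) strands

-- ===== PRECONDITION & SPEC =====
def Spec_can_partition_components (component_sizes : List Int) (strands : List Int) (out : Bool) : Prop := out = can_partition_components_alt component_sizes strands
instance (component_sizes : List Int) (strands : List Int) (out : Bool) : Decidable (Spec_can_partition_components component_sizes strands out) := by unfold Spec_can_partition_components; infer_instance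

-- ===== CLAIM (what is proved, stated in full; the proofs are below) =====
def Claim_equal_can_partition_components : Prop := ∀ (component_sizes : List Int) (strands : List Int), Dom_can_partition_components component_sizes strands → Spec_can_partition_components component_sizes strands (can_partition_components component_sizes strands)

-- ===== LEMMAS AND PROOFS =====

lemma map_getD_range'_eq_drop (xs : List Int) (i : Nat) (hi : i ≤ xs.length) :
    (List.range' i (xs.length - i)).map (fun j => xs.getD j 0) = xs.drop i := by
  apply List.ext_getElem
  · simp
  · intro m h1 h2
    have hm : m < xs.length - i := by simpa using h1
    simp only [List.getElem_map, List.getElem_range', List.getElem_drop, Nat.one_mul]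
    exact List.getD_eq_getElem xs 0 (by omega)

lemma remaining_of_bounded (strands : List Int) (current : List Nat) (i : Nat)
    (hi : i ≤ strands.length) (hc : ∀ j ∈ current, j < i) :
    pvRemaining strands current
      = ((List.range i).filter (fun j => !(current.contains j))).map (fun j => strands.getD j 0)
        ++ strands.drop i := by
  unfold pvRemaining
  have hsplit : List.range strands.length = List.range i ++ List.range' i (strands.length - i) := by
    rw [List.range_eq_range', List.range_eq_range',
      show strands.length = i + (strands.length - i) from by omega]
    have h := List.range'_append (s := 0) (m := i) (n := strands.length - i) (step := 1)
    simpa using h.symm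
  rw [hsplit, List.filter_append, List.map_append]
  congr 1
  have : (List.range' i (strands.length - i)).filter (fun j => !(current.contains j))
       = List.range' i (strands.length - i) := by
    apply List.filter_eq_self.mpr
    intro j hj
    simp only [List.mem_range'] at hj
    simp only [Bool.not_eq_eq_eq_not, Bool.not_true, List.contains_eq_mem, decide_eq_false_iff_not]
    intro hmem
    have := hc j hmem
    omega
  rw [this]
  exact map_getD_range'_eq_drop strands i hi

lemma dfs_eq (rest strands : List Int) (target : Int) :
    ∀ (k i : Nat) (s : Int) (current : List Nat) (skipped : List Int),
    strands.length - i = k → i ≤ strands.length → (∀ j ∈ current, j < i) →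
    skipped = ((List.range i).filter (fun j => !(current.contains j))).map (fun j => strands.getD j 0) →
    altDfs rest strands target i s skipped
      = (pvFindSubsets strands target i current s).any
          (fun sub => altSolve rest (pvRemaining strands sub)) := by
  intro k
  induction k with
  | zero =>
    intro i s current skipped hk hi hc hskip
    have hieq : i = strands.length := by omega
    rw [altDfs.eq_def, pvFindSubsets]
    by_cases hs : s = target
    · simp only [if_pos hs, List.any_cons, List.any_nil, Bool.or_false]
      rw [remaining_of_bounded strands current i hi hc, ← hskip]
    · have hguard : i ≥ strands.length ∨ s > target := Or.inl (le_of_eq hieq.symm)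
      simp [if_neg hs, hguard]
  | succ k ih =>
    intro i s current skipped hk hi hc hskip
    have hilt : i < strands.length := by omega
    rw [altDfs.eq_def, pvFindSubsets]
    by_cases hs : s = target
    · simp only [if_pos hs, List.any_cons, List.any_nil, Bool.or_false]
      rw [remaining_of_bounded strands current i hi hc, ← hskip]
    · by_cases hguard : i ≥ strands.length ∨ s > target
      · simp [if_neg hs, hguard]
      · simp only [if_neg hs, if_neg hguard, List.any_append]
        congr 1
        · -- include branch
          apply ih (i+1) _ (current ++ [i]) skipped (by omega) (by omega)
          · intro j hj
            rcases List.mem_append.mp hj with h | h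
            · exact Nat.lt_succ_of_lt (hc j h)
            · simp at h; omega
          · rw [hskip]
            congr 1
            rw [List.range_succ, List.filter_append]
            have h1 : ([i].filter (fun j => !((current ++ [i]).contains j))) = [] := by
              simp [List.contains_eq_mem]
            have h2 : (List.range i).filter (fun j => !((current ++ [i]).contains j))
                    = (List.range i).filter (fun j => !(current.contains j)) := by
              apply List.filter_congr
              intro j hj
              simp only [List.mem_range] at hj
              simp only [List.contains_eq_mem, List.mem_append, List.mem_singleton]
              have : j ≠ i := by omega
              simp [this]
            rw [h1, h2, List.append_nil]
        · -- exclude branch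
          apply ih (i+1) _ current (skipped ++ [strands.getD i 0]) (by omega) (by omega)
            (fun j hj => Nat.lt_succ_of_lt (hc j hj))
          rw [hskip]
          rw [List.range_succ, List.filter_append, List.map_append]
          congr 1
          have : ([i].filter (fun j => !(current.contains j))) = [i] := by
            simp only [List.filter, List.contains_eq_mem]
            have : i ∉ current := fun h => absurd (hc i h) (by omega)
            simp [this]
          rw [this]
          simp

lemma empty_eq (strands : List Int) : (strands.length == 0) = strands.isEmpty := by
  cases strands <;> rfl

lemma main_eq : ∀ (n : Nat) (cs strands : List Int), cs.length = n →
    can_partition_components cs strands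
      = altSolve (PySem.List.sorted cs (fun x => x) true) strands := by
  intro n
  induction n using Nat.strong_induction_on with
  | _ n ih =>
    intro cs strands hlen
    by_cases hnil : cs = []
    · subst hnil
      rw [can_partition_components]
      rw [show PySem.List.sorted ([] : List Int) (fun x => x) true = [] from rfl,
        altSolve.eq_def]
      exact empty_eq strands
    · rw [can_partition_components]
      simp only [if_neg hnil]
      have hslen : (PySem.List.sorted cs (fun x => x) true).length = cs.length :=
        PySem.List.length_sorted _ _ _
      obtain ⟨target, rest, hsort⟩ : ∃ t r, PySem.List.sorted cs (fun x => x) true = t :: r := by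
        cases h : PySem.List.sorted cs (fun x => x) true with
        | nil => rw [h] at hslen; cases cs; exact absurd rfl hnil; simp at hslen
        | cons a t => exact ⟨a, t, rfl⟩
      rw [hsort]
      simp only [List.headD_cons, List.drop_one, List.tail_cons]
      -- the recursive calls: sorted rest = rest (tail of a descending-sorted list)
      have hpair : rest.Pairwise (fun a b => b ≤ a) := by
        have := PySem.List.sorted_pairwise_rev cs (fun x => x) (κ := Int)
        rw [hsort] at this
        exact this.of_cons
      have hrest : PySem.List.sorted rest (fun x => x) true = rest :=
        PySem.List.sorted_rev_eq_self_of_pairwise _ _ hpair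
      have hrlen : rest.length < n := by
        rw [hsort] at hslen; simp at hslen; omega
      have hcall : ∀ sub, can_partition_components rest (pvRemaining strands sub)
          = altSolve rest (pvRemaining strands sub) := by
        intro sub
        rw [ih rest.length hrlen rest _ rfl, hrest]
      have hdfs := dfs_eq rest strands target (strands.length) 0 0 [] []
        rfl (Nat.zero_le _) (by intro j h; cases h) (by simp)
      have halt : altSolve (target :: rest) strands = altDfs rest strands target 0 0 [] := by
        rw [altSolve.eq_def]
      rw [halt, hdfs]
      by_cases hsub : pvFindSubsets strands target 0 [] 0 = []
      · rw [if_pos hsub, hsub]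
        simp
      · rw [if_neg hsub]
        exact List.any_congr rfl (fun sub => hcall sub)

-- ===== VERDICT (by name: the statement is the Claim_ definition above) =====
theorem can_partition_components_spec : Claim_equal_can_partition_components := by
  intro cs strands _
  unfold Spec_can_partition_components can_partition_components_alt
  exact main_eq cs.length cs strands rfl
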